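-- pv_equiv track=rewrite | github.com/cemililik/ForgeLM | tools/build_usermanuals.py | preprocess_admonitions
-- ===== SOURCE A (Python) =====
-- _ADMONITION_KINDS = ("note", "tip", "warn", "danger", "info")
--
-- def preprocess_admonitions(text: str) -> str:
--     """Replace ``:::kind`` … ``:::`` fences with HTML callout divs.
--
--     Behaviour matches the previous regex implementation: an opening line
--     ``:::kind`` (where kind ∈ note|tip|warn|danger|info) starts a block; the
--     next standalone ``:::`` line closes it. Bodies are rendered through
--     markdown via the wrapping ``<div markdown="1">``.
--     """
--     out: list[str] = []
--     open_kind: str | None = None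
--     body_lines: list[str] = []
--     for line in text.splitlines():
--         stripped = line.rstrip()
--         if open_kind is None:
--             if stripped.startswith(":::") and stripped[3:].strip() in _ADMONITION_KINDS:
--                 open_kind = stripped[3:].strip()
--                 body_lines = []
--                 continue
--             out.append(line)
--         else:
--             if stripped == ":::":
--                 body = "\n".join(body_lines).strip()
--                 out.append(f'<div class="callout callout-{open_kind}" markdown="1">')
--                 out.append("")
--                 out.append(body)
--                 out.append("")
--                 out.append("</div>")
--                 open_kind = None
--                 body_lines = []
--                 continue
--             body_lines.append(line)
--
--     # Unterminated block: keep the original lines untouched so the markdown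
--     # library can render them as plain text and the author sees the bad block.
--     if open_kind is not None:
--         out.append(f":::{open_kind}")
--         out.extend(body_lines)
--
--     return "\n".join(out)
-- ===== SOURCE B (Python) =====
-- _ADMONITION_KINDS = ("note", "tip", "warn", "danger", "info")
--
-- def preprocess_admonitions(text: str) -> str:
--     """Index-based scan: for each opener line, scan ahead for the closing ':::'
--     and emit the whole callout at once; no open/closed state flag is kept."""
--     lines = text.splitlines()
--     n = len(lines)
--     out = []
--     i = 0
--     while i < n:
--         line = lines[i]
--         stripped = line.rstrip()
--         kind = stripped[3:].strip() if stripped.startswith(":::") else ""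
--         if kind in _ADMONITION_KINDS:
--             j = i + 1
--             while j < n and lines[j].rstrip() != ":::":
--                 j += 1
--             body = lines[i + 1:j]
--             if j < n:
--                 out.append(f'<div class="callout callout-{kind}" markdown="1">')
--                 out.append("")
--                 out.append("\n".join(body).strip())
--                 out.append("")
--                 out.append("</div>")
--                 i = j + 1
--             else:
--                 out.append(f":::{kind}")
--                 out.extend(body)
--                 i = j
--         else:
--             out.append(line)
--             i += 1
--     return "\n".join(out)
-- ===== Notes on version B (the rewrite author's own statement) =====
-- stated objective: alternative
-- what changed: Replaces A's one-pass state machine (open_kind flag with accumulated body_lines and a post-loop unterminated fixup) by an index-driven while loop that, at each opener line, scans ahead for the closing ':::' and emits the whole callout (or the raw unterminated tail) at once.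
import Mathlib
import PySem

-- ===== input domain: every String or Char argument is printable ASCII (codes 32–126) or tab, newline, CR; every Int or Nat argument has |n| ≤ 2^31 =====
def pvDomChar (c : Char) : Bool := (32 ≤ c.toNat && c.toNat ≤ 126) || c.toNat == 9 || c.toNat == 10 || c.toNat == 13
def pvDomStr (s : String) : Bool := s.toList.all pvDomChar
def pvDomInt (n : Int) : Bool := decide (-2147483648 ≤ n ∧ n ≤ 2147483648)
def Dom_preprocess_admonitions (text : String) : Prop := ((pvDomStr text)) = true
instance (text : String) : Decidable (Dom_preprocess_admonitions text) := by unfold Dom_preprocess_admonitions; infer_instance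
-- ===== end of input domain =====

-- B replaces A's open/closed state machine by an index-based scan-ahead for the closing ':::' (different decomposition, same cost).

-- ===== PORT A =====
def pvKinds : List String := ["note", "tip", "warn", "danger", "info"]

-- A's single for-loop with state (out, open_kind, body_lines), plus the trailing unterminated-block fixup.
def pvGoA : List String → List String → Option String → List String → List String
  | [], out, openKind, body =>
    match openKind with
    | some k => out ++ (":::" ++ k) :: body
    | none => out
  | line :: rest, out, openKind, body =>
    let stripped := PySem.Str.rstrip line
    match openKind with
    | none =>
      if PySem.Str.startswith stripped ":::" &&
         pvKinds.contains (PySem.Str.strip (PySem.Str.slice stripped (some 3) none)) then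
        pvGoA rest out (some (PySem.Str.strip (PySem.Str.slice stripped (some 3) none))) []
      else
        pvGoA rest (out ++ [line]) none body
    | some k =>
      if stripped == ":::" then
        pvGoA rest (out ++ ["<div class=\"callout callout-" ++ k ++ "\" markdown=\"1\">", "",
                            PySem.Str.strip (PySem.Str.join "\n" body), "", "</div>"]) none []
      else
        pvGoA rest out (some k) (body ++ [line])

def preprocess_admonitions (text : String) : String :=
  PySem.Str.join "\n" (pvGoA (PySem.Str.splitlines text) [] none [])

-- ===== PORT B =====
-- inner `while j < n and lines[j].rstrip() != ":::"` loop: first closing index from j, or n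
def pvScan (lines : List String) (n : Nat) (j : Nat) : Nat :=
  if h : j < n ∧ PySem.Str.rstrip (lines.getD j "") ≠ ":::" then pvScan lines n (j + 1) else j
termination_by n - j
decreasing_by omega

theorem pvScan_ge (lines : List String) (n j : Nat) : j ≤ pvScan lines n j := by
  fun_induction pvScan lines n j with
  | case1 j h ih => omega
  | case2 j h => omega

-- B's outer while-loop over the index i (lines[i] is always in range where read)
def pvGoB (lines : List String) (n : Nat) (i : Nat) : List String :=
  if h : i < n then
    let line := lines.getD i ""
    let stripped := PySem.Str.rstrip line
    let kind := if PySem.Str.startswith stripped ":::" then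
                  PySem.Str.strip (PySem.Str.slice stripped (some 3) none) else ""
    if pvKinds.contains kind then
      let j := pvScan lines n (i + 1)
      let body := PySem.List.slice lines (some ((i + 1 : Nat) : Int)) (some ((j : Nat) : Int))
      if j < n then
        ("<div class=\"callout callout-" ++ kind ++ "\" markdown=\"1\">") :: "" ::
          PySem.Str.strip (PySem.Str.join "\n" body) :: "" :: "</div>" :: pvGoB lines n (j + 1)
      else
        (":::" ++ kind) :: body
    else
      line :: pvGoB lines n (i + 1)
  else []
termination_by n - i
decreasing_by
  · have := pvScan_ge lines n (i + 1); omega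
  · omega

def preprocess_admonitions_alt (text : String) : String :=
  let lines := PySem.Str.splitlines text
  PySem.Str.join "\n" (pvGoB lines lines.length 0)

-- ===== PRECONDITION & SPEC =====
def Spec_preprocess_admonitions (text : String) (out : String) : Prop := out = preprocess_admonitions_alt text
instance (text : String) (out : String) : Decidable (Spec_preprocess_admonitions text out) := by unfold Spec_preprocess_admonitions; infer_instance

-- ===== CLAIM (what is proved, stated in full; the proofs are below) =====
def Claim_equal_preprocess_admonitions : Prop := ∀ (text : String), Dom_preprocess_admonitions text → Spec_preprocess_admonitions text (preprocess_admonitions text)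

-- ===== LEMMAS AND PROOFS =====

-- the kind B computes at line i (proof-side abbreviation of the let-bindings in pvGoB)
def pvKindOf (lines : List String) (i : Nat) : String :=
  if PySem.Str.startswith (PySem.Str.rstrip (lines.getD i "")) ":::" then
    PySem.Str.strip (PySem.Str.slice (PySem.Str.rstrip (lines.getD i "")) (some 3) none)
  else ""

-- what A's open-block state unwinds to, expressed with B's scan
def pvOpenRes (lines : List String) (k : String) (body : List String) (i : Nat) : List String :=
  if pvScan lines lines.length i < lines.length then
    ("<div class=\"callout callout-" ++ k ++ "\" markdown=\"1\">") :: "" ::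
      PySem.Str.strip (PySem.Str.join "\n" (body ++ (lines.drop i).take (pvScan lines lines.length i - i))) :: "" :: "</div>" ::
      pvGoB lines lines.length (pvScan lines lines.length i + 1)
  else
    (":::" ++ k) :: (body ++ lines.drop i)

theorem pvScan_stop (lines : List String) (n j : Nat)
    (h : ¬ (j < n ∧ PySem.Str.rstrip (lines.getD j "") ≠ ":::")) : pvScan lines n j = j := by
  rw [pvScan, dif_neg h]

theorem pvScan_step (lines : List String) (n j : Nat)
    (h : j < n ∧ PySem.Str.rstrip (lines.getD j "") ≠ ":::") :
    pvScan lines n j = pvScan lines n (j + 1) := by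
  rw [pvScan, dif_pos h]

theorem pvScan_le (lines : List String) (n j : Nat) (hj : j ≤ n) : pvScan lines n j ≤ n := by
  fun_induction pvScan lines n j with
  | case1 j h ih => exact ih (by omega)
  | case2 j h => omega

theorem pvKinds_empty : pvKinds.contains "" = false := by decide

theorem pvGoB_plain (lines : List String) (n i : Nat) (hlt : i < n)
    (hk : pvKinds.contains (pvKindOf lines i) = false) :
    pvGoB lines n i = lines.getD i "" :: pvGoB lines n (i + 1) := by
  rw [pvGoB, dif_pos hlt]
  simp only [pvKindOf] at hk
  simp only [hk, Bool.false_eq_true, if_false]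

theorem pvGoB_open (lines : List String) (n i : Nat) (hlt : i < n)
    (hk : pvKinds.contains (pvKindOf lines i) = true) :
    pvGoB lines n i =
      if pvScan lines n (i + 1) < n then
        ("<div class=\"callout callout-" ++ pvKindOf lines i ++ "\" markdown=\"1\">") :: "" ::
          PySem.Str.strip (PySem.Str.join "\n" ((lines.drop (i + 1)).take (pvScan lines n (i + 1) - (i + 1)))) :: "" :: "</div>" ::
          pvGoB lines n (pvScan lines n (i + 1) + 1)
      else
        (":::" ++ pvKindOf lines i) :: (lines.drop (i + 1)).take (pvScan lines n (i + 1) - (i + 1)) := by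
  rw [pvGoB, dif_pos hlt]
  simp only [pvKindOf] at hk ⊢
  simp only [hk, if_true, PySem.List.slice_natCast]

theorem pvMain (lines : List String) (d : Nat) : ∀ (i : Nat), lines.length - i ≤ d →
    (∀ out body, pvGoA (lines.drop i) out none body = out ++ pvGoB lines lines.length i)
    ∧ (∀ out k body, pvGoA (lines.drop i) out (some k) body = out ++ pvOpenRes lines k body i) := by
  induction d with
  | zero =>
    intro i hi
    have hdrop : lines.drop i = [] := List.drop_eq_nil_of_le (by omega)
    have hscan : pvScan lines lines.length i = i := pvScan_stop _ _ _ (by omega)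
    constructor
    · intro out body
      rw [hdrop, pvGoA, pvGoB, dif_neg (show ¬ i < lines.length by omega)]
      simp
    · intro out k body
      rw [hdrop, pvGoA, pvOpenRes, hscan, if_neg (show ¬ i < lines.length by omega), hdrop]
      simp
  | succ d ih =>
    intro i hi
    by_cases hlt : i < lines.length
    case neg => exact ih i (by omega)
    case pos =>
      have hdrop : lines.drop i = lines.getD i "" :: lines.drop (i + 1) := by
        rw [List.getD_eq_getElem _ _ hlt, List.drop_eq_getElem_cons hlt]
      have ih1 := ih (i + 1) (by omega)
      constructor
      · -- state none: either an opener line or a plain line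
        intro out body
        rw [hdrop, pvGoA]
        by_cases hsw : PySem.Str.startswith (PySem.Str.rstrip (lines.getD i "")) ":::"
        case pos =>
          have hkind : pvKindOf lines i
              = PySem.Str.strip (PySem.Str.slice (PySem.Str.rstrip (lines.getD i "")) (some 3) none) := by
            rw [pvKindOf, if_pos hsw]
          by_cases hmem : pvKinds.contains (pvKindOf lines i)
          case pos =>
            rw [hkind] at hmem
            simp only [hsw, hmem, Bool.and_self, if_true]
            rw [ih1.2 out _ [], pvGoB_open lines lines.length i hlt (by rw [hkind]; exact hmem),
                pvOpenRes, hkind]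
            have hle := pvScan_le lines lines.length (i + 1) (by omega)
            split_ifs with hj
            · simp
            · rw [List.take_of_length_le (by rw [List.length_drop]; omega)]
              simp
          case neg =>
            rw [hkind] at hmem
            have hmem' := Bool.not_eq_true _ ▸ hmem
            simp only [hsw, hmem', Bool.and_false, Bool.false_eq_true, if_false]
            rw [ih1.1 (out ++ [lines.getD i ""]) body,
                pvGoB_plain lines lines.length i hlt (by rw [pvKindOf, if_pos hsw]; exact hmem')]
            simp
        case neg =>
          have hsw' := Bool.not_eq_true _ ▸ hsw
          simp only [hsw', Bool.false_and, Bool.false_eq_true, if_false]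
          rw [ih1.1 (out ++ [lines.getD i ""]) body,
              pvGoB_plain lines lines.length i hlt (by rw [pvKindOf, if_neg hsw]; exact pvKinds_empty)]
          simp
      · -- state some k: either the closing line or a body line
        intro out k body
        rw [hdrop, pvGoA]
        by_cases hcl : PySem.Str.rstrip (lines.getD i "") = ":::"
        all_goals rw [List.getD_eq_getElem?_getD] at hcl
        case pos =>
          have hclb : (PySem.Str.rstrip (lines.getD i "") == ":::") = true := by simp [hcl]
          have hscan : pvScan lines lines.length i = i := pvScan_stop _ _ _ (by simp [hcl])
          simp only [hclb, if_true]
          rw [ih1.1, pvOpenRes, hscan, if_pos hlt]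
          simp
        case neg =>
          have hclb : (PySem.Str.rstrip (lines.getD i "") == ":::") = false := by simp [hcl]
          have hscan : pvScan lines lines.length i = pvScan lines lines.length (i + 1) :=
            pvScan_step _ _ _ ⟨hlt, hcl⟩
          simp only [hclb, Bool.false_eq_true, if_false]
          rw [ih1.2 out k (body ++ [lines.getD i ""])]
          congr 1
          rw [pvOpenRes, pvOpenRes, ← hscan]
          have hge1 : i + 1 ≤ pvScan lines lines.length i := by
            rw [hscan]; exact pvScan_ge _ _ _
          split_ifs with hj
          · have htake : (lines.drop i).take (pvScan lines lines.length i - i)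
                = lines.getD i "" :: (lines.drop (i + 1)).take (pvScan lines lines.length i - (i + 1)) := by
              rw [hdrop, show pvScan lines lines.length i - i
                    = (pvScan lines lines.length i - (i + 1)) + 1 by omega]
              simp [List.take_succ_cons]
            rw [htake]; simp
          · rw [hdrop]; simp

-- ===== VERDICT (by name: the statement is the Claim_ definition above) =====
theorem preprocess_admonitions_spec : Claim_equal_preprocess_admonitions := by
  intro text _
  unfold Spec_preprocess_admonitions preprocess_admonitions preprocess_admonitions_alt
  congr 1
  have h := (pvMain (PySem.Str.splitlines text) (PySem.Str.splitlines text).length 0 (by omega)).1 [] []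
  simpa using h
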